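-- pv_equiv track=rewrite | github.com/elroyic/Podcast-Generator | test_full_system.py | _format_script_for_two_speakers
-- ===== SOURCE A (Python) =====
-- def _format_script_for_two_speakers(script: str) -> str:
--     """Format the script for VibeVoice with proper speaker labels."""
--     # Split the script into segments and assign to speakers
--     lines = script.split('\n')
--     formatted_lines = []
--
--     current_speaker = 1
--
--     for line in lines:
--         line = line.strip()
--         if not line:
--             continue
--
--         # Add speaker label
--         formatted_lines.append(f"Speaker {current_speaker}: {line}")
--
--         # Alternate between speakers for natural conversation
--         current_speaker = 2 if current_speaker == 1 else 1
--
--     return '\n'.join(formatted_lines)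
-- ===== SOURCE B (Python) =====
-- def _format_script_for_two_speakers(script: str) -> str:
--     """Format the script for VibeVoice with proper speaker labels."""
--     kept = [s for s in map(str.strip, script.split('\n')) if s]
--     out = []
--     i = 0
--     while i + 1 < len(kept):
--         out.append("Speaker 1: " + kept[i])
--         out.append("Speaker 2: " + kept[i + 1])
--         i += 2
--     if i < len(kept):
--         out.append("Speaker 1: " + kept[i])
--     return '\n'.join(out)
-- ===== Notes on version B (the rewrite author's own statement) =====
-- stated objective: alternative
-- what changed: Replaces A's single stateful pass with a running speaker toggle by a filter pass collecting stripped non-empty lines followed by a stride-2 pair loop that emits the constant labels 'Speaker 1'/'Speaker 2' for each pair (plus a trailing 'Speaker 1' line for an odd leftover), so no speaker state or parity computation exists.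
import Mathlib
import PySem

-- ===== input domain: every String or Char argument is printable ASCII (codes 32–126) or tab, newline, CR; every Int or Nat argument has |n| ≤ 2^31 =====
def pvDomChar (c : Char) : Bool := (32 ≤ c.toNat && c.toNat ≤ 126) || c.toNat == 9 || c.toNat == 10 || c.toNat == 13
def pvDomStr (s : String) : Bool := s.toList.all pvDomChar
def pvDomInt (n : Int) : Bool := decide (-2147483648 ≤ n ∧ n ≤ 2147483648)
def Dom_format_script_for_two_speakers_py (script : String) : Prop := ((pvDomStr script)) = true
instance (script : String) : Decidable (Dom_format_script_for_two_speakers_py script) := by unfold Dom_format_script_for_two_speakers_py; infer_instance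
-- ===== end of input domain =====

-- B replaces A's stateful toggle loop by a filter pass (kept lines) followed by a stride-2
-- pair loop emitting the constant labels "Speaker 1"/"Speaker 2"; same cost, no speaker state.

-- ===== PORT A =====
-- A's loop body: strip, skip empty, append "Speaker {current_speaker}: {line}", toggle speaker
def pvStepA (acc : List (List Char) × Int) (line : List Char) : List (List Char) × Int :=
  let l := PySem.Chars.strip line
  if l = [] then acc
  else (acc.1 ++ ["Speaker ".toList ++ PySem.Int.toChars acc.2 ++ ": ".toList ++ l],
        if acc.2 = 1 then 2 else 1)

-- literal port of A: split on '\n', one fold carrying (formatted_lines, current_speaker)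
def format_script_for_two_speakers_py (script : String) : String :=
  let lines := PySem.Chars.splitOn script.toList ['\n']
  String.ofList (PySem.Chars.join ['\n'] (lines.foldl pvStepA ([], 1)).1)

-- ===== PORT B =====
def pvS1 (x : List Char) : List Char := "Speaker 1: ".toList ++ x
def pvS2 (x : List Char) : List Char := "Speaker 2: ".toList ++ x

-- transcription of B's `while i + 1 < len(kept)` stride-2 loop plus the trailing odd line
def pvPairLoop (kept : List (List Char)) (i : Nat) : List (List Char) :=
  if h : i + 1 < kept.length then
    pvS1 kept[i] :: pvS2 kept[i + 1] :: pvPairLoop kept (i + 2)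
  else if h2 : i < kept.length then [pvS1 kept[i]]
  else []
  termination_by kept.length - i

-- literal port of B: filter the stripped non-empty lines, then the pair loop from i = 0
def format_script_for_two_speakers_py_alt (script : String) : String :=
  let kept := ((PySem.Chars.splitOn script.toList ['\n']).map PySem.Chars.strip).filter (· ≠ [])
  String.ofList (PySem.Chars.join ['\n'] (pvPairLoop kept 0))

-- ===== PRECONDITION & SPEC =====
def Spec_format_script_for_two_speakers_py (script : String) (out : String) : Prop := out = format_script_for_two_speakers_py_alt script
instance (script : String) (out : String) : Decidable (Spec_format_script_for_two_speakers_py script out) := by unfold Spec_format_script_for_two_speakers_py; infer_instance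

-- ===== CLAIM (what is proved, stated in full; the proofs are below) =====
def Claim_equal_format_script_for_two_speakers_py : Prop := ∀ (script : String), Dom_format_script_for_two_speakers_py script → Spec_format_script_for_two_speakers_py script (format_script_for_two_speakers_py script)

-- ===== LEMMAS AND PROOFS =====

-- the label A appends for the n-th kept line (speaker = 1 + n % 2)
def pvLabel (p : Int × List Char) : List Char :=
  "Speaker ".toList ++ PySem.Int.toChars (1 + PySem.Int.mod p.1 2) ++ ": ".toList ++ p.2

-- loop invariant for A: after n kept lines A's speaker is 1 + n % 2, and the lines A appends
-- from here on are exactly the parity labels of the remaining kept lines enumerated from n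
lemma pvKey (lines : List (List Char)) : ∀ (out : List (List Char)) (n : Nat),
    (lines.foldl pvStepA (out, 1 + (n : Int) % 2)).1
      = out ++ (PySem.List.enumerate ((lines.map PySem.Chars.strip).filter (· ≠ [])) (n : Int)).map pvLabel := by
  induction lines with
  | nil => intro out n; simp
  | cons line rest ih =>
    intro out n
    by_cases h : PySem.Chars.strip line = []
    · simp [pvStepA, h, ih out n]
    · have hspk : (if (1 + (n : Int) % 2) = 1 then (2 : Int) else 1) = 1 + ((n + 1 : Nat) : Int) % 2 := by
        push_cast; omega
      have hstep : pvStepA (out, 1 + (n : Int) % 2) line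
          = (out ++ ["Speaker ".toList ++ PySem.Int.toChars (1 + (n : Int) % 2) ++ ": ".toList
                      ++ PySem.Chars.strip line], 1 + ((n + 1 : Nat) : Int) % 2) := by
        simp only [pvStepA, if_neg h, hspk]
      rw [List.foldl_cons, hstep, ih _ (n + 1)]
      simp [h, PySem.List.enumerate_cons, pvLabel]

-- pairwise-structural form of the pair loop
def pvChunks : List (List Char) → List (List Char)
  | [] => []
  | [x] => [pvS1 x]
  | x :: y :: rest => pvS1 x :: pvS2 y :: pvChunks rest

lemma pvLabel_even (k : Int) (x : List Char) : pvLabel (2 * k, x) = pvS1 x := by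
  have hm : PySem.Int.mod (2 * k) 2 = 0 := by
    simp [PySem.Int.mod]
  simp only [pvLabel, hm, pvS1]
  have : "Speaker 1: ".toList = "Speaker ".toList ++ PySem.Int.toChars (1 + 0) ++ ": ".toList := by decide
  rw [this]

lemma pvLabel_odd (k : Int) (x : List Char) : pvLabel (2 * k + 1, x) = pvS2 x := by
  have hm : PySem.Int.mod (2 * k + 1) 2 = 1 := by
    simp [PySem.Int.mod]
  simp only [pvLabel, hm, pvS2]
  have : "Speaker 2: ".toList = "Speaker ".toList ++ PySem.Int.toChars (1 + 1) ++ ": ".toList := by decide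
  rw [this]

lemma pvEnumChunks : ∀ (kept : List (List Char)) (k : Int),
    (PySem.List.enumerate kept (2 * k)).map pvLabel = pvChunks kept
  | [], k => by simp [pvChunks]
  | [x], k => by
      simp [pvChunks, PySem.List.enumerate_cons, pvLabel_even]
  | x :: y :: rest, k => by
      have ih := pvEnumChunks rest (k + 1)
      have h2 : 2 * k + 1 + 1 = 2 * (k + 1) := by ring
      simp only [PySem.List.enumerate_cons, List.map_cons, pvLabel_even, pvLabel_odd, h2, ih,
        pvChunks]

lemma pvPairLoop_eq_chunks (kept : List (List Char)) (i : Nat) :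
    pvPairLoop kept i = pvChunks (kept.drop i) := by
  rw [pvPairLoop]
  split
  · next h =>
    have h1 : i < kept.length := by omega
    have h2 : i + 1 < kept.length := h
    rw [List.drop_eq_getElem_cons h1, List.drop_eq_getElem_cons h2]
    rw [pvPairLoop_eq_chunks kept (i + 2)]
    rfl
  · split
    · next h h2 =>
      have hd : kept.drop (i + 1) = [] := by
        have : kept.length ≤ i + 1 := by omega
        simp [List.drop_eq_nil_of_le this]
      rw [List.drop_eq_getElem_cons h2, hd]
      rfl
    · next h h2 =>
      have : kept.drop i = [] := List.drop_eq_nil_of_le (by omega)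
      rw [this]; rfl
  termination_by kept.length - i

theorem format_script_for_two_speakers_py_eq (script : String) :
    format_script_for_two_speakers_py script = format_script_for_two_speakers_py_alt script := by
  have h := pvKey (PySem.Chars.splitOn script.toList ['\n']) [] 0
  norm_num at h
  have hb := pvEnumChunks ((PySem.Chars.splitOn script.toList ['\n']).map PySem.Chars.strip |>.filter (· ≠ [])) 0
  norm_num at hb
  simp only [format_script_for_two_speakers_py, format_script_for_two_speakers_py_alt, ne_eq,
    decide_not]
  rw [h]
  rw [pvPairLoop_eq_chunks, List.drop_zero, ← hb]

-- ===== VERDICT (by name: the statement is the Claim_ definition above) =====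
theorem format_script_for_two_speakers_py_spec : Claim_equal_format_script_for_two_speakers_py := by
  intro script _
  exact format_script_for_two_speakers_py_eq script
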